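-- pv_equiv track=rewrite | github.com/noviganto/Homeworks | Task#9.py | transpose_two_strings
-- ===== SOURCE A (Python) =====
-- def transpose_two_strings(arr):
--     list_assistant = []
--
--     if len(arr[0]) < len(arr[1]):
--
--         for i in range(len(arr[0])):
--             list_assistant.append(arr[0][i] + ' ' + arr[1][i] + '\n')
--
--         for i in range(len(arr[1]) - len(arr[0]) - 1):
--             list_assistant.append('  ' + arr[1][i + len(arr[0])] + '\n')
--
--         list_assistant.append('  ' + arr[1][len(arr[1]) - 1])
--
--     if len(arr[0]) > len(arr[1]):
--
--         for i in range(len(arr[1])):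
--             list_assistant.append(arr[0][i] + ' ' + arr[1][i] + '\n')
--
--         for i in range(len(arr[0]) - len(arr[1]) - 1):
--             list_assistant.append(arr[0][i + len(arr[1])] + '  ' + '\n')
--
--         list_assistant.append(arr[0][len(arr[0]) - 1] + '  ')
--
--     if len(arr[0]) == len(arr[1]):
--         for i in range(len(arr[1]) - 1):
--             list_assistant.append(arr[0][i] + ' ' + arr[1][i] + '\n')
--         list_assistant.append(arr[0][len(arr[1]) - 1] + ' ' + arr[1][len(arr[1]) - 1])
--
--     transpose_str = str()
--
--     for i in list_assistant:
--         transpose_str = transpose_str + i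
--
--     return transpose_str
-- ===== SOURCE B (Python) =====
-- def transpose_two_strings(arr):
--     a, b = arr[0], arr[1]
--     n = max(len(a), len(b))
--     lines = [(a[i] if i < len(a) else ' ') + ' ' + (b[i] if i < len(b) else ' ')
--              for i in range(n)]
--     return '\n'.join(lines)
-- ===== Notes on version B (the rewrite author's own statement) =====
-- stated objective: simpler
-- what changed: Replaced A's three length-case branches with their separate padding loops and the manual string-concatenation loop by one unified pass over range(max(len(a), len(b))) that pads each side with a space, followed by '\n'.join.
import Mathlib
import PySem

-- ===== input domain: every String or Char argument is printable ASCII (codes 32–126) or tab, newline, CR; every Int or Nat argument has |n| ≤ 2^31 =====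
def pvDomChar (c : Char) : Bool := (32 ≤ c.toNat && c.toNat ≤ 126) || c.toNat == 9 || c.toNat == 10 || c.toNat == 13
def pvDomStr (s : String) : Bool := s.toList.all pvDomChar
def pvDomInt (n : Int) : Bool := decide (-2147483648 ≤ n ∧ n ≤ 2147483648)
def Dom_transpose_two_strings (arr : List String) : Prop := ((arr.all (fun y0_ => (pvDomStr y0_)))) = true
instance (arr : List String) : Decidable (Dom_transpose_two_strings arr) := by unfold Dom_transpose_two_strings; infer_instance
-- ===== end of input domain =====

-- B replaces A's three length-case branches and manual concatenation loop with one
-- unified pass over range(max(len(a), len(b))) plus '\n'.join (objective: simpler).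

-- ===== PORT A =====
-- A: three mutually exclusive length-case branches build list_assistant, then a
-- concatenation loop folds it into one string.
def transpose_two_strings (arr : List String) : String :=
  let a : List Char := (PySem.List.pyGetD arr 0 "").toList
  let b : List Char := (PySem.List.pyGetD arr 1 "").toList
  let list_assistant : List (List Char) :=
    if (a.length : Int) < (b.length : Int) then
      ((PySem.List.pyRange 0 (a.length : Int) 1).map (fun i =>
          [PySem.List.pyGetD a i ' ', ' ', PySem.List.pyGetD b i ' ', '\n']))
      ++ ((PySem.List.pyRange 0 ((b.length : Int) - (a.length : Int) - 1) 1).map (fun i =>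
          [' ', ' ', PySem.List.pyGetD b (i + (a.length : Int)) ' ', '\n']))
      ++ [[' ', ' ', PySem.List.pyGetD b ((b.length : Int) - 1) ' ']]
    else if (a.length : Int) > (b.length : Int) then
      ((PySem.List.pyRange 0 (b.length : Int) 1).map (fun i =>
          [PySem.List.pyGetD a i ' ', ' ', PySem.List.pyGetD b i ' ', '\n']))
      ++ ((PySem.List.pyRange 0 ((a.length : Int) - (b.length : Int) - 1) 1).map (fun i =>
          [PySem.List.pyGetD a (i + (b.length : Int)) ' ', ' ', ' ', '\n']))
      ++ [[PySem.List.pyGetD a ((a.length : Int) - 1) ' ', ' ', ' ']]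
    else
      ((PySem.List.pyRange 0 ((b.length : Int) - 1) 1).map (fun i =>
          [PySem.List.pyGetD a i ' ', ' ', PySem.List.pyGetD b i ' ', '\n']))
      ++ [[PySem.List.pyGetD a ((b.length : Int) - 1) ' ', ' ',
           PySem.List.pyGetD b ((b.length : Int) - 1) ' ']]
  String.ofList (list_assistant.foldl (fun acc i => acc ++ i) [])

-- ===== PORT B =====
-- B: one line per index i < max(len a, len b); '(x[i] if i < len(x) else ' ')' is getD.
def transpose_two_strings_alt (arr : List String) : String :=
  let a : List Char := (PySem.List.pyGetD arr 0 "").toList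
  let b : List Char := (PySem.List.pyGetD arr 1 "").toList
  let n : Nat := max a.length b.length
  let lines : List (List Char) :=
    (List.range n).map (fun i =>
      [(if i < a.length then a.getD i ' ' else ' '), ' ',
       (if i < b.length then b.getD i ' ' else ' ')])
  String.ofList (PySem.Chars.join ['\n'] lines)

-- ===== PRECONDITION & SPEC =====
-- Pre_ excludes arr with fewer than two elements (arr[0]/arr[1] raise IndexError) and
-- the case where both strings are empty (A's arr[0][-1]/arr[1][-1] raises IndexError).
def Pre_transpose_two_strings (arr : List String) : Prop :=
  2 ≤ arr.length ∧ (arr.getD 0 "" ≠ "" ∨ arr.getD 1 "" ≠ "")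
instance (arr : List String) : Decidable (Pre_transpose_two_strings arr) := by
  unfold Pre_transpose_two_strings; infer_instance

def pvWitness_transpose_two_strings : List String := ["ab", "xyz"]

def Spec_transpose_two_strings (arr : List String) (out : String) : Prop :=
  out = transpose_two_strings_alt arr
instance (arr : List String) (out : String) : Decidable (Spec_transpose_two_strings arr out) := by
  unfold Spec_transpose_two_strings; infer_instance

-- ===== CLAIM (what is proved, stated in full; the proofs are below) =====
def Claim_equal_transpose_two_strings : Prop := ∀ (arr : List String), Dom_transpose_two_strings arr → Pre_transpose_two_strings arr → Spec_transpose_two_strings arr (transpose_two_strings arr)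

-- ===== LEMMAS AND PROOFS =====

-- '\n'.join applied to one more piece at the end (nonempty prefix list).
lemma join_append_singleton (sep x : List Char) (l : List (List Char)) (h : l ≠ []) :
    PySem.Chars.join sep (l ++ [x]) = PySem.Chars.join sep l ++ sep ++ x := by
  induction l with
  | nil => exact absurd rfl h
  | cons p l ih =>
    cases l with
    | nil => simp [PySem.Chars.join_cons_cons, PySem.Chars.join_singleton]
    | cons q r =>
      simp only [List.cons_append] at ih ⊢
      rw [PySem.Chars.join_cons_cons, ih (by simp), PySem.Chars.join_cons_cons]
      simp [List.append_assoc]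

-- Core shape fact: A's 'row ++ newline for every earlier row, bare last row'
-- concatenation is '\n'.join of all the rows.
lemma flatten_newline_eq_join (f : Nat → List Char) (m : Nat) :
    ((List.range m).map (fun i => f i ++ ['\n'])).flatten ++ f m
      = PySem.Chars.join ['\n'] ((List.range (m + 1)).map f) := by
  induction m with
  | zero => simp [PySem.Chars.join_singleton]
  | succ m ih =>
    rw [List.range_succ (n := m + 1), List.map_append, List.map_singleton,
      join_append_singleton _ _ _ (by simp), ← ih,
      List.range_succ (n := m), List.map_append]
    simp [List.append_assoc]

-- A's fold-concatenation is flatten.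
lemma foldl_append_eq_flatten (l : List (List Char)) :
    l.foldl (fun acc i => acc ++ i) [] = l.flatten := by
  simpa using PySem.List.foldl_append_eq_flatMap (g := id) l []

-- The row B builds for index i.
def pvRow (a b : List Char) (i : Nat) : List Char :=
  [(if i < a.length then a.getD i ' ' else ' '), ' ',
   (if i < b.length then b.getD i ' ' else ' ')]

lemma pvRow_lt (a b : List Char) (i : Nat) (ha : i < a.length) (hb : i < b.length) :
    pvRow a b i = [a.getD i ' ', ' ', b.getD i ' '] := by
  simp [pvRow, ha, hb]

lemma pvRow_right (a b : List Char) (i : Nat) (ha : a.length ≤ i) (hb : i < b.length) :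
    pvRow a b i = [' ', ' ', b.getD i ' '] := by
  simp [pvRow, hb, Nat.not_lt.mpr ha]

lemma pvRow_left (a b : List Char) (i : Nat) (ha : i < a.length) (hb : b.length ≤ i) :
    pvRow a b i = [a.getD i ' ', ' ', ' '] := by
  simp [pvRow, ha, Nat.not_lt.mpr hb]

-- ===== VERDICT (by name: the statement is the Claim_ definition above) =====
theorem transpose_two_strings_spec : Claim_equal_transpose_two_strings := by
  intro arr _hdom hpre
  obtain ⟨hlen, hne⟩ := hpre
  unfold Spec_transpose_two_strings transpose_two_strings transpose_two_strings_alt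
  set a : List Char := (PySem.List.pyGetD arr 0 "").toList with ha
  set b : List Char := (PySem.List.pyGetD arr 1 "").toList with hb
  have hnotboth : ¬ (a.length = 0 ∧ b.length = 0) := by
    rintro ⟨h0, h1⟩
    rcases hne with h | h
    · apply h
      rw [show arr.getD 0 "" = PySem.List.pyGetD arr 0 "" from
        (PySem.List.pyGetD_zero arr "").symm]
      exact String.toList_eq_nil_iff.mp (by rw [← ha]; exact List.length_eq_zero_iff.mp h0)
    · apply h
      rw [show arr.getD 1 "" = PySem.List.pyGetD arr 1 "" from
        (PySem.List.pyGetD_ofNat' arr 1 "").symm]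
      exact String.toList_eq_nil_iff.mp (by rw [← hb]; exact List.length_eq_zero_iff.mp h1)
  simp only []
  rw [foldl_append_eq_flatten]
  congr 1
  have hrow : ∀ (n : Nat),
      ((List.range n).map (fun i =>
        ([(if i < a.length then a.getD i ' ' else ' '), ' ',
          (if i < b.length then b.getD i ' ' else ' ')] : List Char)))
      = (List.range n).map (pvRow a b) := by
    intro n; exact List.map_congr_left (fun i _ => rfl)
  by_cases hlt : (a.length : Int) < (b.length : Int)
  · -- len(a) < len(b): rows 0..la-1 paired, la..lb-2 right-only, last row lb-1
    have hlt' : a.length < b.length := by exact_mod_cast hlt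
    have hmax : max a.length b.length = b.length := by omega
    have hkey := flatten_newline_eq_join (pvRow a b) (b.length - 1)
    rw [show b.length - 1 + 1 = b.length by omega] at hkey
    rw [if_pos hlt, hrow, hmax, ← hkey]
    have p1 : (PySem.List.pyRange 0 (a.length : Int) 1).map (fun i =>
          ([PySem.List.pyGetD a i ' ', ' ', PySem.List.pyGetD b i ' ', '\n'] : List Char))
        = (List.range a.length).map (fun i => pvRow a b i ++ ['\n']) := by
      rw [PySem.List.pyRange_zero_nat, List.map_map]
      refine List.map_congr_left (fun i hi => ?_)
      have hi' : i < a.length := List.mem_range.mp hi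
      simp [Function.comp, PySem.List.pyGetD_natCast, pvRow_lt a b i hi' (by omega)]
    have p2 : (PySem.List.pyRange 0 ((b.length : Int) - (a.length : Int) - 1) 1).map (fun i =>
          ([' ', ' ', PySem.List.pyGetD b (i + (a.length : Int)) ' ', '\n'] : List Char))
        = ((List.range (b.length - 1 - a.length)).map (fun x => a.length + x)).map
            (fun i => pvRow a b i ++ ['\n']) := by
      rw [show ((b.length : Int) - (a.length : Int) - 1)
            = ((b.length - 1 - a.length : Nat) : Int) by omega,
        PySem.List.pyRange_zero_nat, List.map_map, List.map_map]
      refine List.map_congr_left (fun i hi => ?_)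
      have hi' : i < b.length - 1 - a.length := List.mem_range.mp hi
      simp only [Function.comp]
      rw [show ((i : Int) + (a.length : Int)) = ((a.length + i : Nat) : Int) by omega,
        PySem.List.pyGetD_natCast, pvRow_right a b (a.length + i) (by omega) (by omega)]
      rfl
    have plast : ([' ', ' ', PySem.List.pyGetD b ((b.length : Int) - 1) ' '] : List Char)
        = pvRow a b (b.length - 1) := by
      rw [show ((b.length : Int) - 1) = ((b.length - 1 : Nat) : Int) by omega]
      simp [PySem.List.pyGetD_natCast, pvRow_right a b (b.length - 1) (by omega) (by omega)]
    rw [p1, p2, plast,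
      show b.length - 1 = a.length + (b.length - 1 - a.length) by omega,
      List.range_add, List.map_append]
    simp [List.flatten_append]
  · by_cases hgt : (a.length : Int) > (b.length : Int)
    · -- len(a) > len(b): rows 0..lb-1 paired, lb..la-2 left-only, last row la-1
      have hgt' : b.length < a.length := by exact_mod_cast hgt
      have hmax : max a.length b.length = a.length := by omega
      have hkey := flatten_newline_eq_join (pvRow a b) (a.length - 1)
      rw [show a.length - 1 + 1 = a.length by omega] at hkey
      rw [if_neg hlt, if_pos hgt, hrow, hmax, ← hkey]
      have p1 : (PySem.List.pyRange 0 (b.length : Int) 1).map (fun i =>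
            ([PySem.List.pyGetD a i ' ', ' ', PySem.List.pyGetD b i ' ', '\n'] : List Char))
          = (List.range b.length).map (fun i => pvRow a b i ++ ['\n']) := by
        rw [PySem.List.pyRange_zero_nat, List.map_map]
        refine List.map_congr_left (fun i hi => ?_)
        have hi' : i < b.length := List.mem_range.mp hi
        simp [Function.comp, PySem.List.pyGetD_natCast, pvRow_lt a b i (by omega) hi']
      have p2 : (PySem.List.pyRange 0 ((a.length : Int) - (b.length : Int) - 1) 1).map (fun i =>
            ([PySem.List.pyGetD a (i + (b.length : Int)) ' ', ' ', ' ', '\n'] : List Char))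
          = ((List.range (a.length - 1 - b.length)).map (fun x => b.length + x)).map
              (fun i => pvRow a b i ++ ['\n']) := by
        rw [show ((a.length : Int) - (b.length : Int) - 1)
              = ((a.length - 1 - b.length : Nat) : Int) by omega,
          PySem.List.pyRange_zero_nat, List.map_map, List.map_map]
        refine List.map_congr_left (fun i hi => ?_)
        have hi' : i < a.length - 1 - b.length := List.mem_range.mp hi
        simp only [Function.comp]
        rw [show ((i : Int) + (b.length : Int)) = ((b.length + i : Nat) : Int) by omega,
          PySem.List.pyGetD_natCast, pvRow_left a b (b.length + i) (by omega) (by omega)]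
        rfl
      have plast : ([PySem.List.pyGetD a ((a.length : Int) - 1) ' ', ' ', ' '] : List Char)
          = pvRow a b (a.length - 1) := by
        rw [show ((a.length : Int) - 1) = ((a.length - 1 : Nat) : Int) by omega]
        simp [PySem.List.pyGetD_natCast, pvRow_left a b (a.length - 1) (by omega) (by omega)]
      rw [p1, p2, plast,
        show a.length - 1 = b.length + (a.length - 1 - b.length) by omega,
        List.range_add, List.map_append]
      simp [List.flatten_append]
    · -- equal lengths, not both zero
      have heq : a.length = b.length := by omega
      have hb1 : 1 ≤ b.length := by omega
      have hmax : max a.length b.length = b.length := by omega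
      have hkey := flatten_newline_eq_join (pvRow a b) (b.length - 1)
      rw [show b.length - 1 + 1 = b.length by omega] at hkey
      rw [if_neg hlt, if_neg hgt, hrow, hmax, ← hkey]
      have p1 : (PySem.List.pyRange 0 ((b.length : Int) - 1) 1).map (fun i =>
            ([PySem.List.pyGetD a i ' ', ' ', PySem.List.pyGetD b i ' ', '\n'] : List Char))
          = (List.range (b.length - 1)).map (fun i => pvRow a b i ++ ['\n']) := by
        rw [show ((b.length : Int) - 1) = ((b.length - 1 : Nat) : Int) by omega,
          PySem.List.pyRange_zero_nat, List.map_map]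
        refine List.map_congr_left (fun i hi => ?_)
        have hi' : i < b.length - 1 := List.mem_range.mp hi
        simp [Function.comp, PySem.List.pyGetD_natCast, pvRow_lt a b i (by omega) (by omega)]
      have plast : ([PySem.List.pyGetD a ((b.length : Int) - 1) ' ', ' ',
            PySem.List.pyGetD b ((b.length : Int) - 1) ' '] : List Char)
          = pvRow a b (b.length - 1) := by
        rw [show ((b.length : Int) - 1) = ((b.length - 1 : Nat) : Int) by omega]
        simp [PySem.List.pyGetD_natCast, pvRow_lt a b (b.length - 1) (by omega) (by omega)]
      rw [p1, plast]
      simp [List.flatten_append]
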